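-- pv_equiv track=rewrite | github.com/owid/etl | snapshots/iucn/2025-09-09/endemic_invertebrates.py | _make_headers
-- ===== SOURCE A (Python) =====
-- from typing import Iterable, List
--
-- def _make_headers(group_row: Iterable, sub_row: Iterable) -> List[str]:
--     """
--     Build flattened headers like:
--       'FW Crabs - Total endemics', 'FW Crabs - Threatened endemics', 'FW Crabs - EX & EW endemics',
--       ..., 'Reef-forming Corals - EX & EW endemics'
--     """
--     headers: List[str] = []
--     current_group = None
--     for i, (g, s) in enumerate(zip(group_row, sub_row)):
--         if i == 0:
--             headers.append("region_or_country")
--             continue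
--         g = (g or "").strip()
--         s = (s or "").strip().replace("\n", " ")
--         if g:
--             current_group = g
--         headers.append(f"{current_group} - {s}".strip())
--     return headers
-- ===== SOURCE B (Python) =====
-- from typing import Iterable, List
--
-- def _make_headers(group_row: Iterable, sub_row: Iterable) -> List[str]:
--     pairs = list(zip(group_row, sub_row))
--     # Pass 1: forward-fill the group label for every column after the first
--     # (column 0 is the region column and carries no group).
--     filled: List = [None] * len(pairs)
--     cur = None
--     for i in range(1, len(pairs)):
--         g = (pairs[i][0] or "").strip()
--         if g:
--             cur = g
--         filled[i] = cur
--     # Pass 2: render each header from the filled table.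
--     out: List[str] = []
--     for i, ((_, s), grp) in enumerate(zip(pairs, filled)):
--         if i == 0:
--             out.append("region_or_country")
--         else:
--             s = (s or "").strip().replace("\n", " ")
--             out.append(f"{grp} - {s}".strip())
--     return out
-- ===== Notes on version B (the rewrite author's own statement) =====
-- stated objective: alternative
-- what changed: Replaces the single stateful carry-forward loop by two passes: one that builds a forward-filled table of group labels, and a second rendering pass over the zipped table.
import Mathlib
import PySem

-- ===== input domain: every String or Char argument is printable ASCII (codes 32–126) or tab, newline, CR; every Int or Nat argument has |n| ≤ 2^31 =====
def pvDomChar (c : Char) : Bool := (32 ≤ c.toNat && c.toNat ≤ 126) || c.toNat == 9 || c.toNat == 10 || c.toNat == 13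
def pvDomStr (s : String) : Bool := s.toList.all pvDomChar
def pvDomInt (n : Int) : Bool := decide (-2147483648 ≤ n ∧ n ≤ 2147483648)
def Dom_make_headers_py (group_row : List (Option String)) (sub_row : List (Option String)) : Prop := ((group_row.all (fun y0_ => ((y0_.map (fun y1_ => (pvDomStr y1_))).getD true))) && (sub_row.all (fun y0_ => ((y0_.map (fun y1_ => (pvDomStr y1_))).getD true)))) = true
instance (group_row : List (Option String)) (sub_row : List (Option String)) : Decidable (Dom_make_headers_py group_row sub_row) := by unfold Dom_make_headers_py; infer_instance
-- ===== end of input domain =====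

-- ===== PORT A =====
-- B restructures A's single stateful loop into a forward-fill pass plus a rendering pass (objective: alternative decomposition, same cost).

-- f-string rendering of current_group (str(None) = "None")
def pyFmtOpt : Option String → String
  | none => "None"
  | some g => g

def mkhA_loop : List ((Option String) × (Option String)) → Nat → Option String → List String
  | [], _, _ => []
  | (g, s) :: rest, i, cur =>
    if i = 0 then
      "region_or_country" :: mkhA_loop rest (i + 1) cur
    else
      let g' := PySem.Str.strip (g.getD "")
      let s' := PySem.Str.replace (PySem.Str.strip (s.getD "")) "\n" " "
      let cur' := if g' ≠ "" then some g' else cur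
      (PySem.Str.strip (pyFmtOpt cur' ++ " - " ++ s')) :: mkhA_loop rest (i + 1) cur'

def make_headers_py (group_row : List (Option String)) (sub_row : List (Option String)) : List String :=
  mkhA_loop (group_row.zip sub_row) 0 none

-- ===== PORT B =====
-- pass 1 of Source B: forward-fill the carried group over columns 1..n-1
def mkhB_fill : Option String → List (Option String) → List (Option String)
  | _, [] => []
  | cur, g :: rest =>
    let g' := PySem.Str.strip (g.getD "")
    let cur' := if g' ≠ "" then some g' else cur
    cur' :: mkhB_fill cur' rest

-- pass 2 of Source B: render each header from the zipped table
def mkhB_render : List (((Option String) × (Option String)) × Option String) → Nat → List String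
  | [], _ => []
  | ((_, s), grp) :: rest, i =>
    (if i = 0 then "region_or_country"
     else PySem.Str.strip (pyFmtOpt grp ++ " - " ++ PySem.Str.replace (PySem.Str.strip (s.getD "")) "\n" " "))
      :: mkhB_render rest (i + 1)

def make_headers_py_alt (group_row : List (Option String)) (sub_row : List (Option String)) : List String :=
  let pairs := group_row.zip sub_row
  let filled : List (Option String) :=
    match pairs with
    | [] => []
    | _ :: rest => none :: mkhB_fill none (rest.map Prod.fst)
  mkhB_render (pairs.zip filled) 0

-- ===== PRECONDITION & SPEC =====
def Spec_make_headers_py (group_row : List (Option String)) (sub_row : List (Option String)) (out : List String) : Prop := out = make_headers_py_alt group_row sub_row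
instance (group_row : List (Option String)) (sub_row : List (Option String)) (out : List String) : Decidable (Spec_make_headers_py group_row sub_row out) := by unfold Spec_make_headers_py; infer_instance

-- ===== CLAIM =====
def Claim_equal_make_headers_py : Prop := ∀ (group_row : List (Option String)) (sub_row : List (Option String)), Dom_make_headers_py group_row sub_row → Spec_make_headers_py group_row sub_row (make_headers_py group_row sub_row)

-- ===== LEMMAS AND PROOFS =====
theorem mkh_tail_eq : ∀ (ps : List ((Option String) × (Option String))) (cur : Option String) (n : Nat),
    mkhA_loop ps (n + 1) cur = mkhB_render (ps.zip (mkhB_fill cur (ps.map Prod.fst))) (n + 1) := by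
  intro ps
  induction ps with
  | nil => intro cur n; simp [mkhA_loop, mkhB_fill, mkhB_render]
  | cons p rest ih =>
    intro cur n
    obtain ⟨g, s⟩ := p
    simp [mkhA_loop, mkhB_fill, mkhB_render, ih]

-- ===== VERDICT =====
theorem make_headers_py_spec : Claim_equal_make_headers_py := by
  intro group_row sub_row _
  unfold Spec_make_headers_py make_headers_py make_headers_py_alt
  cases h : group_row.zip sub_row with
  | nil => simp [mkhA_loop, mkhB_render]
  | cons p rest =>
    obtain ⟨g, s⟩ := p
    simp only [mkhA_loop, List.zip_cons_cons, mkhB_render, reduceIte]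
    exact congrArg _ (mkh_tail_eq rest none 0)
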